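-- pv_equiv track=rewrite | github.com/rendermagix/houdini2chat | tools/network_visualizer/parser.py | parse_raw_parameters
-- ===== SOURCE A (Python) =====
-- def parse_raw_parameters(raw_params):
--     """
--     Parses raw parameter lines into structured parameters.
--
--     Each parameter is identified by a line starting without leading whitespace that contains a colon,
--     and its description includes the subsequent lines until the next parameter or end of input.
--
--     Args:
--         raw_params (list): List of raw parameter lines.
--
--     Returns:
--         list: A list of dictionaries with keys 'name' and 'description'.
--     """
--     parsed_params = []
--     current_param = None
--     current_desc_lines = []
--     for line in raw_params:
--         # A new parameter starts when the line has no leading whitespace and contains a colon.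
--         if line and not line[0].isspace() and ":" in line:
--             if current_param:
--                 parsed_params.append({
--                     "name": current_param,
--                     "description": "\n".join(current_desc_lines).strip()
--                 })
--                 current_desc_lines = []
--             parts = line.split(":", 1)
--             current_param = parts[0].strip()
--             first_desc = parts[1].strip()
--             if first_desc:
--                 current_desc_lines.append(first_desc)
--         else:
--             if current_param:
--                 current_desc_lines.append(line.strip())
--     if current_param:
--         parsed_params.append({
--             "name": current_param,
--             "description": "\n".join(current_desc_lines).strip()
--         })
--     return parsed_params
-- ===== SOURCE B (Python) =====
-- def parse_raw_parameters(raw_params):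
--     """Two-phase parse: group the lines into blocks, one per header line
--     (a line with no leading whitespace that contains a colon), then turn
--     each block into a {'name', 'description'} dict; blocks whose name
--     (the text before the colon) is empty are malformed and skipped."""
--     def is_header(line):
--         return bool(line) and not line[0].isspace() and ":" in line
--
--     blocks = []
--     for line in raw_params:
--         if is_header(line):
--             blocks.append([line])
--         elif blocks:
--             blocks[-1].append(line)
--
--     params = []
--     for header, *body in blocks:
--         name, _, rest = header.partition(":")
--         name = name.strip()
--         if not name:
--             continue
--         rest = rest.strip()
--         desc_lines = ([rest] if rest else []) + [l.strip() for l in body]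
--         params.append({"name": name, "description": "\n".join(desc_lines).strip()})
--     return params
-- ===== Notes on version B (the rewrite author's own statement) =====
-- stated objective: alternative
-- what changed: A's single stateful pass (current_param/current_desc_lines with flush-on-next-header and a trailing flush) is replaced by a two-phase pipeline: first group the lines into header/body blocks, then map each block with a non-empty name to its name/description dict, skipping nameless blocks.
-- intended difference: On inputs where a nameless header line (one starting with ':') has non-empty after-colon text and a named header follows later, A leaks that text into the start of the next parameter's description (leftover loop state of a pseudo-parameter it never flushes), while B skips the malformed nameless block; B's clean description is the intended value. — e.g. on parse_raw_parameters([": x", "a: b"]): A returns [[("name", "a"), ("description", "x\nb")]], B returns [[("name", "a"), ("description", "b")]]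
import Mathlib
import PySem

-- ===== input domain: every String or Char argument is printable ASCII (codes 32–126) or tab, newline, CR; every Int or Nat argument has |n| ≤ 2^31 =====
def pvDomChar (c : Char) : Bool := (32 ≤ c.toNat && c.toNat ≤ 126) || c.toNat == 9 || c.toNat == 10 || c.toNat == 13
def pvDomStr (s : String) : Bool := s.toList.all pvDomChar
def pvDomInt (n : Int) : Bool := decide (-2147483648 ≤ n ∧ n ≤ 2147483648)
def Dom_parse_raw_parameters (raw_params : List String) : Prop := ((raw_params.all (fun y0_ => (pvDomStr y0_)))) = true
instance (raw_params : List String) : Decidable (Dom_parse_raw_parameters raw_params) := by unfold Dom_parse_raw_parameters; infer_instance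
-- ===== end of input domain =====

-- B regroups the work in two phases (partition the lines into header/body blocks, then map each
-- block with a non-empty name to a dict) instead of A's single fold with flush-on-next-header
-- state; objective: alternative. A's leak of a nameless header's after-colon text into the next
-- parameter's description is stated as an intended difference (D_ below), not reproduced.

-- ===== PORT A =====
-- Python truthiness of the `current_param` variable (None or a string): `if current_param:`
def pyTruthy : Option String → Bool
  | none => false
  | some s => s != ""

-- one iteration of A's `for line in raw_params` loop over the state (parsed_params, current_param, current_desc_lines)
def pvAStep (st : List (List (String × String)) × Option String × List String) (line : String) :
    List (List (String × String)) × Option String × List String :=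
  let parsed := st.1
  let current_param := st.2.1
  let current_desc_lines := st.2.2
  if (match line.toList with
      | [] => false
      | c :: _ => !PySem.Chars.isspace c && PySem.Str.isIn ":" line) then
    let parsed :=
      if pyTruthy current_param then
        parsed ++ [[("name", current_param.getD ""),
                    ("description", PySem.Str.strip (PySem.Str.join "\n" current_desc_lines))]]
      else parsed
    let current_desc_lines := if pyTruthy current_param then [] else current_desc_lines
    let parts := (PySem.Str.splitMax? line ":" 1).getD []
    let current_param' := PySem.Str.strip (PySem.List.pyGetD parts 0 "")
    let first_desc := PySem.Str.strip (PySem.List.pyGetD parts 1 "")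
    let current_desc_lines :=
      if first_desc != "" then current_desc_lines ++ [first_desc] else current_desc_lines
    (parsed, some current_param', current_desc_lines)
  else
    if pyTruthy current_param then
      (parsed, current_param, current_desc_lines ++ [PySem.Str.strip line])
    else
      (parsed, current_param, current_desc_lines)

-- the trailing `if current_param: parsed_params.append(...)` after the loop
def pvAFinal (st : List (List (String × String)) × Option String × List String) :
    List (List (String × String)) :=
  if pyTruthy st.2.1 then
    st.1 ++ [[("name", st.2.1.getD ""),
              ("description", PySem.Str.strip (PySem.Str.join "\n" st.2.2))]]
  else st.1

def parse_raw_parameters (raw_params : List String) : List (List (String × String)) :=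
  pvAFinal (raw_params.foldl pvAStep ([], none, []))

-- ===== PORT B =====
def pvIsHeader (line : String) : Bool :=
  match line.toList with
  | [] => false
  | c :: _ => !PySem.Chars.isspace c && PySem.Str.isIn ":" line

-- name / stripped after-colon text of a header line (header.partition(":") + strip; on a header
-- line the colon is present, so split-at-first-colon is exactly partition)
def pvName (l : String) : String :=
  PySem.Str.strip (PySem.List.pyGetD ((PySem.Str.splitMax? l ":" 1).getD []) 0 "")
def pvFirst (l : String) : String :=
  PySem.Str.strip (PySem.List.pyGetD ((PySem.Str.splitMax? l ":" 1).getD []) 1 "")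
def pvFirstList (l : String) : List String :=
  if pvFirst l != "" then [pvFirst l] else []

-- phase 1: group the lines into (header, body) blocks
def pvBStep (blocks : List (String × List String)) (line : String) : List (String × List String) :=
  if pvIsHeader line then blocks ++ [(line, [])]
  else
    match blocks.getLast? with
    | none => blocks
    | some (h, b) => blocks.dropLast ++ [(h, b ++ [line])]

def pvBlocks (raw_params : List String) : List (String × List String) :=
  raw_params.foldl pvBStep []

-- phase 2: each block with a non-empty name becomes a dict; nameless blocks are skipped
def pvEmit (res : List (List (String × String))) (blk : String × List String) :
    List (List (String × String)) :=
  if pvName blk.1 != "" then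
    res ++ [[("name", pvName blk.1),
             ("description",
              PySem.Str.strip (PySem.Str.join "\n"
                (pvFirstList blk.1 ++ blk.2.map PySem.Str.strip)))]]
  else res

def parse_raw_parameters_alt (raw_params : List String) : List (List (String × String)) :=
  (pvBlocks raw_params).foldl pvEmit []

-- ===== PRECONDITION & SPEC =====
-- D_ inspects the input's shape on its own, character by character:
-- a nameless header line starting with ':' whose after-colon text has a non-whitespace character
def pvLeak (l : String) : Bool :=
  match l.toList with
  | ':' :: rest => rest.any (fun c => !PySem.Chars.isspace c)
  | _ => false
-- a header line with a non-empty name: non-space, non-colon first character and a ':' in the line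
def pvNamed (l : String) : Bool :=
  match l.toList with
  | [] => false
  | c :: rest => !PySem.Chars.isspace c && !(c == ':') && (c :: rest).contains ':'
-- some nameless header with after-colon text is followed (anywhere later) by a named header
def pvPat (t : List String) : Bool :=
  t.tails.any (fun s => match s with | [] => false | x :: r => pvLeak x && r.any pvNamed)

-- On inputs where a nameless header line (it starts with ':') carries after-colon text and a named
-- header follows later, A leaks that text into the start of the next parameter's description
-- (leftover loop state, since the nameless pseudo-parameter is never flushed), while B simply
-- skips the malformed nameless block; B's value is the intended one.
def D_parse_raw_parameters (raw_params : List String) : Prop := pvPat raw_params = true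
instance (raw_params : List String) : Decidable (D_parse_raw_parameters raw_params) := by
  unfold D_parse_raw_parameters; infer_instance

def Spec_parse_raw_parameters (raw_params : List String) (out : List (List (String × String))) :
    Prop := ¬ D_parse_raw_parameters raw_params → out = parse_raw_parameters_alt raw_params
instance (raw_params : List String) (out : List (List (String × String))) :
    Decidable (Spec_parse_raw_parameters raw_params out) := by
  unfold Spec_parse_raw_parameters; infer_instance

def pvDiffWitness_parse_raw_parameters : List String := [": x", "a: b"]
def pvDiffWitnessOut_parse_raw_parameters :
    (List (List (String × String))) × (List (List (String × String))) :=
  ([[("name", "a"), ("description", "x\nb")]], [[("name", "a"), ("description", "b")]])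

-- ===== CLAIM (what is proved, stated in full; the proofs are below) =====
def Claim_unchanged_parse_raw_parameters : Prop :=
  ∀ (raw_params : List String), Dom_parse_raw_parameters raw_params →
    Spec_parse_raw_parameters raw_params (parse_raw_parameters raw_params)
def Claim_changed_parse_raw_parameters : Prop :=
  Dom_parse_raw_parameters (pvDiffWitness_parse_raw_parameters) ∧
  D_parse_raw_parameters (pvDiffWitness_parse_raw_parameters) ∧
  parse_raw_parameters (pvDiffWitness_parse_raw_parameters) =
    pvDiffWitnessOut_parse_raw_parameters.1 ∧
  parse_raw_parameters_alt (pvDiffWitness_parse_raw_parameters) =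
    pvDiffWitnessOut_parse_raw_parameters.2 ∧
  pvDiffWitnessOut_parse_raw_parameters.1 ≠ pvDiffWitnessOut_parse_raw_parameters.2
def Claim_exact_parse_raw_parameters : Prop :=
  ∀ (raw_params : List String), Dom_parse_raw_parameters raw_params →
    D_parse_raw_parameters raw_params →
    parse_raw_parameters raw_params ≠ parse_raw_parameters_alt raw_params

-- ===== LEMMAS AND PROOFS =====
lemma go_acc (sep : List Char) (fuel : Nat) : ∀ (m : Nat) (l cur : List Char) (accs : List (List Char)),
    PySem.Chars.splitOnMax.go sep fuel m l cur accs = accs.reverse ++ PySem.Chars.splitOnMax.go sep fuel m l cur [] := by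
  induction fuel with
  | zero => intro m l cur accs; simp [PySem.Chars.splitOnMax.go]
  | succ fuel ih =>
    intro m l cur accs
    cases l with
    | nil => simp [PySem.Chars.splitOnMax.go]
    | cons c rest =>
      simp only [PySem.Chars.splitOnMax.go]
      by_cases hm : m = 0
      · simp [hm]
      · simp only [hm, if_false]
        by_cases hp : sep.isPrefixOf (c :: rest) = true
        · simp only [hp, if_true]
          rw [ih _ _ _ (cur.reverse :: accs), ih _ _ _ [cur.reverse]]
          simp
        · simp only [hp, Bool.false_eq_true, if_false]
          rw [ih _ rest (c :: cur) accs]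

lemma go_head (sep : List Char) (fuel : Nat) : ∀ (m : Nat) (l cur : List Char),
    ∃ t ts, PySem.Chars.splitOnMax.go sep fuel m l cur [] = (cur.reverse ++ t) :: ts := by
  induction fuel with
  | zero => intro m l cur; exact ⟨l, [], by simp [PySem.Chars.splitOnMax.go]⟩
  | succ fuel ih =>
    intro m l cur
    cases l with
    | nil => exact ⟨[], [], by simp [PySem.Chars.splitOnMax.go]⟩
    | cons c rest =>
      by_cases hm : m = 0
      · exact ⟨c :: rest, [], by simp [PySem.Chars.splitOnMax.go, hm]⟩
      · by_cases hp : sep.isPrefixOf (c :: rest) = true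
        · refine ⟨[], ?_, ?_⟩
          · exact PySem.Chars.splitOnMax.go sep fuel (m-1) (List.drop sep.length (c::rest)) [] []
          · simp only [PySem.Chars.splitOnMax.go, hm, if_false, hp, if_true]
            rw [go_acc]
            simp
        · obtain ⟨t, ts, h⟩ := ih m rest (c :: cur)
          refine ⟨c :: t, ts, ?_⟩
          simp only [PySem.Chars.splitOnMax.go, hm, if_false, hp, Bool.false_eq_true, if_false]
          rw [h]
          simp

lemma split_colon (rest : List Char) :
    PySem.Chars.splitOnMax (':' :: rest) [':'] 1 = [[], rest] := by
  have h1 : PySem.Chars.splitOnMax (':' :: rest) [':'] 1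
      = PySem.Chars.splitOnMax.go [':'] ((':' :: rest).length + 1) 1 (':' :: rest) [] [] := by
    simp [PySem.Chars.splitOnMax]
  rw [h1]
  have h2 : PySem.Chars.splitOnMax.go [':'] (rest.length + 1 + 1) 1 (':' :: rest) [] []
      = PySem.Chars.splitOnMax.go [':'] (rest.length + 1) 0 rest [] [[]] := by
    simp [PySem.Chars.splitOnMax.go, List.isPrefixOf]
  simp only [List.length_cons, h2]
  rw [go_acc]
  cases rest with
  | nil => simp [PySem.Chars.splitOnMax.go]
  | cons c t => simp [PySem.Chars.splitOnMax.go]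

lemma split_noncolon (c : Char) (rest : List Char) (hc : c ≠ ':') :
    ∃ t ts, PySem.Chars.splitOnMax (c :: rest) [':'] 1 = (c :: t) :: ts := by
  have h1 : PySem.Chars.splitOnMax (c :: rest) [':'] 1
      = PySem.Chars.splitOnMax.go [':'] ((c :: rest).length + 1) 1 (c :: rest) [] [] := by
    simp [PySem.Chars.splitOnMax]
  have hp : ([':'] : List Char).isPrefixOf (c :: rest) = false := by
    simp [List.isPrefixOf]
    intro h; exact absurd h.symm hc
  have h2 : PySem.Chars.splitOnMax.go [':'] (rest.length + 1 + 1) 1 (c :: rest) [] []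
      = PySem.Chars.splitOnMax.go [':'] (rest.length + 1) 1 rest [c] [] := by
    simp [PySem.Chars.splitOnMax.go, hp]
  obtain ⟨t, ts, h⟩ := go_head [':'] (rest.length + 1) 1 rest [c]
  exact ⟨t, ts, by rw [h1]; simp only [List.length_cons, h2]; rw [h]; simp⟩

lemma strip_cons_ne_nil (c : Char) (t : List Char) (hc : PySem.Chars.isspace c = false) :
    PySem.Chars.strip (c :: t) ≠ [] := by
  unfold PySem.Chars.strip PySem.Chars.lstrip PySem.Chars.rstrip
  rw [List.dropWhile_cons_of_neg (by simp [hc])]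
  intro h
  rw [List.reverse_eq_nil_iff, List.dropWhile_eq_nil_iff] at h
  exact absurd (h c (by simp)) (by simp [hc])

lemma strip_all_space (t : List Char) (h : ∀ x ∈ t, PySem.Chars.isspace x = true) :
    PySem.Chars.strip t = [] := by
  unfold PySem.Chars.strip PySem.Chars.lstrip PySem.Chars.rstrip
  rw [List.dropWhile_eq_nil_iff.mpr h]
  simp


lemma strSplit (l : String) : PySem.Str.splitMax? l ":" 1
    = some ((PySem.Chars.splitOnMax l.toList [':'] 1).map String.ofList) := by
  have h : (":" : String).toList = [':'] := rfl
  simp [PySem.Str.splitMax?, PySem.Chars.splitMax?, h]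

lemma pvName_colon (l : String) (rest : List Char) (h : l.toList = ':' :: rest) :
    pvName l = "" := by
  unfold pvName
  rw [strSplit, h, split_colon]
  simp [PySem.List.pyGetD, PySem.List.pyGet?, PySem.List.pyIdx?, PySem.Str.strip,
    PySem.Chars.strip, PySem.Chars.lstrip, PySem.Chars.rstrip]

lemma pvFirst_colon (l : String) (rest : List Char) (h : l.toList = ':' :: rest) :
    pvFirst l = String.ofList (PySem.Chars.strip rest) := by
  unfold pvFirst
  rw [strSplit, h, split_colon]
  simp [PySem.List.pyGetD, PySem.List.pyGet?, PySem.List.pyIdx?, PySem.Str.strip]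

lemma pvName_noncolon (l : String) (c : Char) (rest : List Char) (h : l.toList = c :: rest)
    (hc : c ≠ ':') (hs : PySem.Chars.isspace c = false) : pvName l ≠ "" := by
  unfold pvName
  rw [strSplit, h]
  obtain ⟨t, ts, hsp⟩ := split_noncolon c rest hc
  rw [hsp]
  simp only [List.map_cons, Option.getD_some, PySem.List.pyGetD, PySem.List.pyGet?]
  simp only [PySem.List.pyIdx?]
  norm_num
  intro hcon
  have : PySem.Chars.strip (c :: t) = [] := by
    have := congrArg String.toList hcon
    simpa [PySem.Str.strip] using this
  exact strip_cons_ne_nil c t hs this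

lemma singleton_infix_mem {a : Char} {l : List Char} (h : [a] <:+: l) : a ∈ l := by
  obtain ⟨s, t, hst⟩ := h
  rw [← hst]; simp

lemma pvBR1 (l : String) (hH : pvIsHeader l = true) (hn : pvName l ≠ "") :
    pvNamed l = true := by
  unfold pvIsHeader at hH
  cases hl : l.toList with
  | nil => rw [hl] at hH; exact absurd hH (by simp)
  | cons c rest =>
    rw [hl] at hH
    simp only [Bool.and_eq_true, Bool.not_eq_true'] at hH
    obtain ⟨hs, hin⟩ := hH
    have hc : c ≠ ':' := by
      intro hcol
      exact hn (pvName_colon l rest (by rw [hl, hcol]))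
    have hmem : ':' ∈ l.toList := by
      have := (PySem.Str.isIn_iff_infix ":" l).mp hin
      exact singleton_infix_mem (by simpa using this)
    unfold pvNamed
    rw [hl]
    simp only [Bool.and_eq_true, Bool.not_eq_true']
    refine ⟨⟨hs, by simp [hc]⟩, ?_⟩
    rw [hl] at hmem
    simpa using hmem

lemma pvBR2 (l : String) (hH : pvIsHeader l = true) (hn : pvName l = "")
    (hf : pvFirst l ≠ "") : pvLeak l = true := by
  unfold pvIsHeader at hH
  cases hl : l.toList with
  | nil => rw [hl] at hH; exact absurd hH (by simp)
  | cons c rest =>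
    rw [hl] at hH
    simp only [Bool.and_eq_true, Bool.not_eq_true'] at hH
    obtain ⟨hs, _⟩ := hH
    have hc : c = ':' := by
      by_contra hcol
      exact pvName_noncolon l c rest hl hcol hs hn
    subst hc
    unfold pvLeak
    rw [hl]
    have hstr : PySem.Chars.strip rest ≠ [] := by
      intro hz
      apply hf
      rw [pvFirst_colon l rest hl, hz]
    by_contra hany
    simp only [Bool.not_eq_true, List.any_eq_false, Bool.not_eq_true'] at hany
    exact hstr (strip_all_space rest (fun x hx => by simpa using hany x hx))


lemma pvBStep_ne_nil (cs : List (String × List String)) (l : String) (h : cs ≠ []) :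
    pvBStep cs l ≠ [] := by
  unfold pvBStep
  split
  · simp
  · cases hgl : cs.getLast? with
    | none => simpa [hgl] using h
    | some p => cases p with | mk hh bb => simp

lemma pvB_prefix (raw : List String) (bs cs : List (String × List String)) (h : cs ≠ []) :
    List.foldl pvBStep (bs ++ cs) raw = bs ++ List.foldl pvBStep cs raw := by
  induction raw generalizing bs cs with
  | nil => rfl
  | cons l t ih =>
    simp only [List.foldl_cons]
    have hstep : pvBStep (bs ++ cs) l = bs ++ pvBStep cs l := by
      unfold pvBStep
      split
      · simp
      · rw [List.getLast?_append_of_ne_nil bs h]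
        cases hgl : cs.getLast? with
        | none => simp_all
        | some p =>
          cases p with
          | mk hh bb => simp [List.dropLast_append_of_ne_nil h]
    rw [hstep, ih _ _ (pvBStep_ne_nil cs l h)]

lemma pvPat_cons (l : String) (t : List String) :
    pvPat (l :: t) = ((pvLeak l && t.any pvNamed) || pvPat t) := by
  simp [pvPat, List.tails]

-- the main invariant: A's loop state once a header has been seen, against B's block fold.
-- `descA` is A's current_desc_lines; when the current name is empty it is exactly the leaked
-- after-colon texts, which (under ¬pvPat) are either empty or never flushed.
lemma pvMain (t : List String) :
    ∀ (res : List (List (String × String))) (h : String) (b descA : List String),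
      pvPat t = false →
      (pvName h = "" → (descA = [] ∨ t.any pvNamed = false)) →
      (pvName h ≠ "" → descA = pvFirstList h ++ b.map PySem.Str.strip) →
      pvAFinal (List.foldl pvAStep (res, some (pvName h), descA) t)
        = List.foldl pvEmit res (List.foldl pvBStep [(h, b)] t) := by
  induction t with
  | nil =>
    intro res h b descA _ hemp hne
    by_cases hn : pvName h = ""
    · simp [pvAFinal, pyTruthy, hn, pvEmit]
    · simp [pvAFinal, pyTruthy, hn, pvEmit, hne hn]
  | cons l t ih =>
    intro res h b descA hpat hemp hne
    rw [pvPat_cons] at hpat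
    have hpat' : pvPat t = false := by
      cases hx : pvPat t <;> simp [hx] at hpat ⊢
    have hleak : pvLeak l = true → t.any pvNamed = false := by
      intro hl
      cases hx : t.any pvNamed <;> simp [hl, hx] at hpat ⊢
    simp only [List.foldl_cons]
    by_cases hH : pvIsHeader l = true
    · -- l is a header: B opens a new block, A may flush
      have hbs : pvBStep [(h, b)] l = [(h, b)] ++ [(l, [])] := by
        unfold pvBStep; rw [if_pos hH]
      rw [hbs, pvB_prefix t [(h, b)] [(l, [])] (by simp), List.foldl_append,
        List.foldl_cons, List.foldl_nil]
      by_cases hn : pvName h = ""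
      · -- no flush; pvEmit skips the (h,b) block
        have htr : pyTruthy (some (pvName h)) = false := by simp [pyTruthy, hn]
        have hstep : pvAStep (res, some (pvName h), descA) l
            = (res, some (pvName l), descA ++ pvFirstList l) := by
          unfold pvAStep
          rw [if_pos (by simpa [pvIsHeader] using hH)]
          simp only [htr, Bool.false_eq_true, if_false]
          simp only [pvName, pvFirst, pvFirstList]
          split <;> simp
        rw [hstep]
        have hEmit : pvEmit res (h, b) = res := by simp [pvEmit, hn]
        rw [hEmit]
        by_cases hnl : pvName l = ""
        · -- the new block is nameless too
          rcases hemp hn with hd | hnam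
          · subst hd
            refine ih res l [] ([] ++ pvFirstList l) hpat' ?_ (by simp [hnl])
            intro _
            by_cases hf : pvFirst l = ""
            · left; simp [pvFirstList, hf]
            · right
              exact hleak (pvBR2 l hH hnl hf)
          · have hnam' : t.any pvNamed = false := by
              simp only [List.any_cons, Bool.or_eq_false_iff] at hnam
              exact hnam.2
            refine ih res l [] (descA ++ pvFirstList l) hpat' (fun _ => Or.inr hnam') (by simp [hnl])
        · -- the new block is named: descA must be [] (else a named header would follow a leak)
          have hd : descA = [] := by
            rcases hemp hn with hd | hnam
            · exact hd
            · exfalso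
              have : pvNamed l = true := pvBR1 l hH hnl
              simp [List.any_cons, this] at hnam
          subst hd
          exact ih res l [] ([] ++ pvFirstList l) hpat'
            (fun hc => absurd hc hnl) (fun _ => by simp)
      · -- flush the current parameter; pvEmit emits the (h,b) block
        have htr : pyTruthy (some (pvName h)) = true := by simp [pyTruthy, hn]
        have hstep : pvAStep (res, some (pvName h), descA) l
            = (res ++ [[("name", pvName h),
                ("description", PySem.Str.strip (PySem.Str.join "\n" descA))]],
               some (pvName l), [] ++ pvFirstList l) := by
          unfold pvAStep
          rw [if_pos (by simpa [pvIsHeader] using hH)]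
          simp only [htr, if_true, Option.getD_some]
          simp only [pvName, pvFirst, pvFirstList]
          split <;> simp
        rw [hstep]
        have hEmit : pvEmit res (h, b)
            = res ++ [[("name", pvName h),
                ("description", PySem.Str.strip (PySem.Str.join "\n" descA))]] := by
          simp [pvEmit, hn, hne hn]
        rw [hEmit]
        refine ih _ l [] ([] ++ pvFirstList l) hpat' ?_ (fun _ => by simp)
        intro hnl
        by_cases hf : pvFirst l = ""
        · left; simp [pvFirstList, hf]
        · right; exact hleak (pvBR2 l hH hnl hf)
    · -- l is not a header: B appends it to the open block, A appends its strip when named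
      have hbs : pvBStep [(h, b)] l = [(h, b ++ [l])] := by
        unfold pvBStep; rw [if_neg hH]; simp
      rw [hbs]
      by_cases hn : pvName h = ""
      · have htr : pyTruthy (some (pvName h)) = false := by simp [pyTruthy, hn]
        have hstep : pvAStep (res, some (pvName h), descA) l
            = (res, some (pvName h), descA) := by
          unfold pvAStep
          rw [if_neg (by simpa [pvIsHeader] using hH)]
          simp [htr]
        rw [hstep]
        refine ih res h (b ++ [l]) descA hpat' ?_ (fun hc => absurd hn hc)
        intro _
        rcases hemp hn with hd | hnam
        · exact Or.inl hd
        · right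
          simp only [List.any_cons, Bool.or_eq_false_iff] at hnam
          exact hnam.2
      · have htr : pyTruthy (some (pvName h)) = true := by simp [pyTruthy, hn]
        have hstep : pvAStep (res, some (pvName h), descA) l
            = (res, some (pvName h), descA ++ [PySem.Str.strip l]) := by
          unfold pvAStep
          rw [if_neg (by simpa [pvIsHeader] using hH)]
          simp [htr]
        rw [hstep]
        refine ih res h (b ++ [l]) (descA ++ [PySem.Str.strip l]) hpat'
          (fun hc => absurd hc hn) ?_
        intro _
        rw [hne hn]
        simp

-- before the first header both sides ignore every line
lemma pvMain_none (raw : List String) (hpat : pvPat raw = false) :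
    pvAFinal (List.foldl pvAStep ([], none, []) raw)
      = (List.foldl pvBStep [] raw).foldl pvEmit [] := by
  induction raw with
  | nil => rfl
  | cons l t ih =>
    rw [pvPat_cons] at hpat
    have hpat' : pvPat t = false := by
      cases hx : pvPat t <;> simp [hx] at hpat ⊢
    simp only [List.foldl_cons]
    by_cases hH : pvIsHeader l = true
    · have hstep : pvAStep ([], none, []) l
          = ([], some (pvName l), [] ++ pvFirstList l) := by
        unfold pvAStep
        rw [if_pos (by simpa [pvIsHeader] using hH)]
        simp only [pyTruthy, Bool.false_eq_true, if_false]
        simp only [pvName, pvFirst, pvFirstList]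
        split <;> simp
      have hbs : pvBStep [] l = [(l, [])] := by unfold pvBStep; rw [if_pos hH]; rfl
      rw [hstep, hbs]
      refine pvMain t [] l [] ([] ++ pvFirstList l) hpat' ?_ (fun _ => by simp)
      intro hnl
      by_cases hf : pvFirst l = ""
      · left; simp [pvFirstList, hf]
      · right
        have hleak : pvLeak l = true := pvBR2 l hH hnl hf
        cases hx : t.any pvNamed <;> simp [hleak, hx] at hpat ⊢
    · have hstep : pvAStep ([], none, []) l = ([], none, []) := by
        unfold pvAStep
        rw [if_neg (by simpa [pvIsHeader] using hH)]
        simp [pyTruthy]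
      have hbs : pvBStep [] l = [] := by unfold pvBStep; rw [if_neg hH]; rfl
      rw [hstep, hbs, ih hpat']


-- ===== tightness: inside D_ the two ports always differ =====
-- the count of non-whitespace characters: invariant under strip/join-with-'\n', so the leaked
-- description lines make A's description string strictly 'heavier' than B's
def pvN (l : List Char) : Nat := (l.filter (fun c => !PySem.Chars.isspace c)).length
def pvNS (s : String) : Nat := pvN s.toList

lemma pvN_append (a b : List Char) : pvN (a ++ b) = pvN a + pvN b := by simp [pvN]

lemma pvN_dropWhile_sp (l : List Char) :
    pvN (l.dropWhile PySem.Chars.isspace) = pvN l := by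
  conv_rhs => rw [← List.takeWhile_append_dropWhile (p := PySem.Chars.isspace) (l := l)]
  rw [pvN_append]
  have h0 : pvN (l.takeWhile PySem.Chars.isspace) = 0 := by
    simp only [pvN, List.length_eq_zero_iff, List.filter_eq_nil_iff]
    intro a ha
    simp [List.mem_takeWhile_imp ha]
  omega

lemma pvN_reverse (l : List Char) : pvN l.reverse = pvN l := by
  simp [pvN, List.filter_reverse]

lemma pvN_strip (l : List Char) : pvN (PySem.Chars.strip l) = pvN l := by
  unfold PySem.Chars.strip PySem.Chars.lstrip PySem.Chars.rstrip
  rw [pvN_reverse, pvN_dropWhile_sp, pvN_reverse, pvN_dropWhile_sp]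

lemma pvNS_strip (s : String) : pvNS (PySem.Str.strip s) = pvNS s := by
  simp [pvNS, PySem.Str.strip, pvN_strip]

lemma pvN_join : ∀ ls : List (List Char), pvN (PySem.Chars.join ['\n'] ls) = (ls.map pvN).sum := by
  intro ls
  induction ls with
  | nil => simp [PySem.Chars.join, List.intercalate, pvN]
  | cons x t ih =>
    cases t with
    | nil => simp [PySem.Chars.join, List.intercalate, pvN]
    | cons y u =>
      rw [PySem.Chars.join_cons_cons]
      rw [pvN_append, pvN_append, ih]
      have : pvN ['\n'] = 0 := by decide
      simp [this]

lemma pvNS_join (parts : List String) :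
    pvNS (PySem.Str.join "\n" parts) = (parts.map pvNS).sum := by
  have h : ("\n" : String).toList = ['\n'] := rfl
  simp only [pvNS, PySem.Str.join, String.toList_ofList, h, pvN_join]
  rw [List.map_map]
  rfl

lemma pvNS_strip_pos (s : String) (h : PySem.Str.strip s ≠ "") : 1 ≤ pvNS (PySem.Str.strip s) := by
  rw [pvNS_strip]
  by_contra hc
  have h0 : pvN s.toList = 0 := by unfold pvNS at hc; omega
  apply h
  have hall : ∀ x ∈ s.toList, PySem.Chars.isspace x = true := by
    intro x hx
    by_contra hsp
    have hmem : x ∈ s.toList.filter (fun c => !PySem.Chars.isspace c) := by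
      simp only [List.mem_filter]
      exact ⟨hx, by simpa using hsp⟩
    have hlen := List.length_pos_of_mem hmem
    simp only [pvN] at h0
    omega
  show PySem.Str.strip s = ""
  unfold PySem.Str.strip
  rw [strip_all_space s.toList hall]

lemma pvNS_first_pos (l : String) (hf : pvFirst l ≠ "") : 1 ≤ pvNS (pvFirst l) :=
  pvNS_strip_pos _ hf

-- more bridges between the ports' header parsing and D_'s line predicates
lemma pvBR_not_header_named (l : String) (h : ¬ pvIsHeader l = true) : pvNamed l = false := by
  unfold pvNamed
  cases hl : l.toList with
  | nil => rfl
  | cons c rest =>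
    by_contra hc
    simp only [Bool.not_eq_false, Bool.and_eq_true, Bool.not_eq_true'] at hc
    obtain ⟨⟨hs, _⟩, hmem⟩ := hc
    apply h
    unfold pvIsHeader
    rw [hl]
    simp only [Bool.and_eq_true, Bool.not_eq_true']
    refine ⟨hs, ?_⟩
    rw [PySem.Str.isIn_iff_infix]
    have : ':' ∈ l.toList := by rw [hl]; simpa using hmem
    obtain ⟨u, v, huv⟩ := List.append_of_mem this
    exact ⟨u, v, by rw [huv]; simp⟩

lemma pvBR_not_header_leak (l : String) (h : ¬ pvIsHeader l = true) : pvLeak l = false := by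
  unfold pvLeak
  cases hl : l.toList with
  | nil => rfl
  | cons c rest =>
    by_cases hc : c = ':'
    · subst hc
      by_contra hany
      apply h
      unfold pvIsHeader
      rw [hl]
      simp only [Bool.and_eq_true, Bool.not_eq_true']
      refine ⟨by decide, ?_⟩
      rw [PySem.Str.isIn_iff_infix]
      exact ⟨[], rest, by rw [hl]; rfl⟩
    · cases c <;> simp_all [pvLeak]

lemma pvBR_name_ne_leak (l : String) (hn : pvName l ≠ "") : pvLeak l = false := by
  unfold pvLeak
  cases hl : l.toList with
  | nil => rfl
  | cons c rest =>
    by_cases hc : c = ':'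
    · exfalso
      exact hn (pvName_colon l rest (by rw [hl, hc]))
    · cases c <;> simp_all [pvLeak]

lemma pvBR_name_empty_named (l : String) (hn : pvName l = "") : pvNamed l = false := by
  unfold pvNamed
  cases hl : l.toList with
  | nil => rfl
  | cons c rest =>
    by_contra hc
    simp only [Bool.not_eq_false, Bool.and_eq_true, Bool.not_eq_true'] at hc
    obtain ⟨⟨hs, hcc⟩, _⟩ := hc
    exact pvName_noncolon l c rest hl (by simpa using hcc) hs hn

lemma pvBR_first_empty_leak (l : String) (hf : pvFirst l = "") : pvLeak l = false := by
  unfold pvLeak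
  cases hl : l.toList with
  | nil => rfl
  | cons c rest =>
    by_cases hc : c = ':'
    · subst hc
      by_contra hany
      simp only [Bool.not_eq_false, List.any_eq_true, Bool.not_eq_true'] at hany
      obtain ⟨x, hx, hxs⟩ := hany
      have h1 : pvFirst l = String.ofList (PySem.Chars.strip rest) := pvFirst_colon l rest hl
      rw [hf] at h1
      have h2 : PySem.Chars.strip rest = [] := by
        have := congrArg String.toList h1
        simpa using this.symm
      have h3 : pvN rest = 0 := by rw [← pvN_strip, h2]; rfl
      have hmem : x ∈ rest.filter (fun c => !PySem.Chars.isspace c) := by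
        simp only [List.mem_filter]
        exact ⟨hx, by simpa using hxs⟩
      have hlen := List.length_pos_of_mem hmem
      have h4 : (rest.filter (fun c => !PySem.Chars.isspace c)).length = 0 := h3
      omega
    · cases c <;> simp_all [pvLeak]

lemma pvPat_any_named : ∀ u : List String, pvPat u = true → u.any pvNamed = true := by
  intro u
  induction u with
  | nil => intro h; simp [pvPat] at h
  | cons l t ih =>
    intro h
    rw [pvPat_cons] at h
    rcases Bool.or_eq_true_iff.mp h with h1 | h2
    · simp only [Bool.and_eq_true] at h1
      simp [List.any_cons, h1.2]
    · simp [List.any_cons, ih h2]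

-- both ports only append to the accumulated result
lemma pvA_prefix : ∀ (t : List String) (res : List (List (String × String)))
    (p : Option String) (d : List String),
    pvAFinal (List.foldl pvAStep (res, p, d) t)
      = res ++ pvAFinal (List.foldl pvAStep ([], p, d) t) := by
  intro t
  induction t with
  | nil =>
    intro res p d
    simp only [List.foldl_nil, pvAFinal]
    split <;> simp_all
  | cons l t ih =>
    intro res p d
    have hst : pvAStep (res, p, d) l
        = (res ++ (pvAStep ([], p, d) l).1, (pvAStep ([], p, d) l).2) := by
      unfold pvAStep
      split <;> by_cases hp : pyTruthy p = true <;> simp [hp] <;> (try (split <;> simp))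
    simp only [List.foldl_cons]
    rw [hst]
    obtain ⟨s1, s2⟩ := pvAStep ([], p, d) l
    rw [ih (res ++ s1) s2.1 s2.2, ih s1 s2.1 s2.2]
    simp

lemma pvE_prefix : ∀ (bs : List (String × List String)) (res : List (List (String × String))),
    List.foldl pvEmit res bs = res ++ List.foldl pvEmit [] bs := by
  intro bs
  induction bs with
  | nil => intro res; simp
  | cons b t ih =>
    intro res
    have hst : pvEmit res b = res ++ pvEmit [] b := by
      unfold pvEmit; split <;> simp
    simp only [List.foldl_cons]
    rw [hst, ih (res ++ pvEmit [] b), ih (pvEmit [] b)]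
    simp

-- what each side produces after the current (named) parameter: the rest of the lines
def pvRestA : List String → List (List (String × String))
  | [] => []
  | l :: u => pvAFinal (List.foldl pvAStep ([], some (pvName l), pvFirstList l) u)

def pvRestB (u : List String) : List (List (String × String)) :=
  (List.foldl pvBStep [] u).foldl pvEmit []

-- A's fold from a named state: the first flushed dict made explicit
lemma pvLA : ∀ (t : List String) (res : List (List (String × String))) (name : String)
    (d : List String), name ≠ "" →
    pvAFinal (List.foldl pvAStep (res, some name, d) t)
      = res ++ [[("name", name),
          ("description", PySem.Str.strip (PySem.Str.join "\n"
            (d ++ (t.takeWhile (fun l => !pvIsHeader l)).map PySem.Str.strip)))]]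
        ++ pvRestA (t.dropWhile (fun l => !pvIsHeader l)) := by
  intro t
  induction t with
  | nil =>
    intro res name d hn
    simp [pvAFinal, pyTruthy, hn, pvRestA]
  | cons l t ih =>
    intro res name d hn
    have htr : pyTruthy (some name) = true := by simpa [pyTruthy] using hn
    simp only [List.foldl_cons]
    by_cases hH : pvIsHeader l = true
    · have hstep : pvAStep (res, some name, d) l
          = (res ++ [[("name", name),
              ("description", PySem.Str.strip (PySem.Str.join "\n" d))]],
             some (pvName l), [] ++ pvFirstList l) := by
        unfold pvAStep
        rw [if_pos (by simpa [pvIsHeader] using hH)]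
        simp only [htr, if_true, Option.getD_some]
        simp only [pvName, pvFirst, pvFirstList]
        split <;> simp
      rw [hstep, pvA_prefix]
      rw [List.takeWhile_cons_of_neg (by simp [hH]), List.dropWhile_cons_of_neg (by simp [hH])]
      simp [pvRestA]
    · have hstep : pvAStep (res, some name, d) l
          = (res, some name, d ++ [PySem.Str.strip l]) := by
        unfold pvAStep
        rw [if_neg (by simpa [pvIsHeader] using hH)]
        simp [htr]
      rw [hstep, ih res name (d ++ [PySem.Str.strip l]) hn]
      rw [List.takeWhile_cons_of_pos (by simp [hH]), List.dropWhile_cons_of_pos (by simp [hH])]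
      simp

-- B's fold from an open named block: the first emitted dict made explicit
lemma pvLB : ∀ (t : List String) (res : List (List (String × String))) (h : String)
    (b : List String), pvName h ≠ "" →
    List.foldl pvEmit res (List.foldl pvBStep [(h, b)] t)
      = res ++ [[("name", pvName h),
          ("description", PySem.Str.strip (PySem.Str.join "\n"
            (pvFirstList h ++ ((b ++ t.takeWhile (fun l => !pvIsHeader l)).map PySem.Str.strip))))]]
        ++ pvRestB (t.dropWhile (fun l => !pvIsHeader l)) := by
  intro t
  induction t with
  | nil =>
    intro res h b hn
    simp [pvEmit, hn, pvRestB, PySem.Chars.join]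
  | cons l t ih =>
    intro res h b hn
    simp only [List.foldl_cons]
    by_cases hH : pvIsHeader l = true
    · have hbs : pvBStep [(h, b)] l = [(h, b)] ++ [(l, [])] := by
        unfold pvBStep; rw [if_pos hH]
      rw [hbs, pvB_prefix t [(h, b)] [(l, [])] (by simp), List.singleton_append,
        List.foldl_cons, pvE_prefix]
      have hEmit : pvEmit res (h, b)
          = res ++ [[("name", pvName h),
              ("description", PySem.Str.strip (PySem.Str.join "\n"
                (pvFirstList h ++ b.map PySem.Str.strip)))]] := by
        simp [pvEmit, hn]
      rw [hEmit]
      rw [List.takeWhile_cons_of_neg (by simp [hH]), List.dropWhile_cons_of_neg (by simp [hH])]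
      have hrb : pvRestB (l :: t) = List.foldl pvEmit [] (List.foldl pvBStep [(l, [])] t) := by
        unfold pvRestB
        have : List.foldl pvBStep [] (l :: t) = List.foldl pvBStep (pvBStep [] l) t := rfl
        rw [this]
        have : pvBStep [] l = [(l, [])] := by unfold pvBStep; rw [if_pos hH]; rfl
        rw [this]
      rw [hrb]
      simp
    · have hbs : pvBStep [(h, b)] l = [(h, b ++ [l])] := by
        unfold pvBStep; rw [if_neg hH]; simp
      rw [hbs, ih res h (b ++ [l]) hn]
      rw [List.takeWhile_cons_of_pos (by simp [hH]), List.dropWhile_cons_of_pos (by simp [hH])]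
      simp

lemma pvOut_ne (res X Y : List (List (String × String))) (x y : List (String × String))
    (hxy : x ≠ y) : res ++ x :: X ≠ res ++ y :: Y := by
  intro he
  have h2 := List.append_cancel_left he
  injection h2 with h3 _
  exact hxy h3

-- the core: current parameter nameless, pending description lines non-empty, a named header ahead
lemma pvDIFF1 : ∀ (t : List String) (res : List (List (String × String))) (h : String)
    (b descA : List String), pvName h = "" → descA ≠ [] → (∀ e ∈ descA, 1 ≤ pvNS e) →
    t.any pvNamed = true →
    pvAFinal (List.foldl pvAStep (res, some (pvName h), descA) t)
      ≠ List.foldl pvEmit res (List.foldl pvBStep [(h, b)] t) := by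
  intro t
  induction t with
  | nil => intro _ _ _ _ _ _ _ hany; simp at hany
  | cons l t ih =>
    intro res h b descA hn hne hP hany
    have htr : pyTruthy (some (pvName h)) = false := by simp [pyTruthy, hn]
    simp only [List.foldl_cons]
    by_cases hH : pvIsHeader l = true
    · have hstep : pvAStep (res, some (pvName h), descA) l
          = (res, some (pvName l), descA ++ pvFirstList l) := by
        unfold pvAStep
        rw [if_pos (by simpa [pvIsHeader] using hH)]
        simp only [htr, Bool.false_eq_true, if_false]
        simp only [pvName, pvFirst, pvFirstList]
        split <;> simp
      have hbs : pvBStep [(h, b)] l = [(h, b)] ++ [(l, [])] := by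
        unfold pvBStep; rw [if_pos hH]
      rw [hstep, hbs, pvB_prefix t [(h, b)] [(l, [])] (by simp), List.singleton_append,
        List.foldl_cons]
      have hEmit : pvEmit res (h, b) = res := by simp [pvEmit, hn]
      rw [hEmit]
      by_cases hnl : pvName l = ""
      · have hPl : ∀ e ∈ descA ++ pvFirstList l, 1 ≤ pvNS e := by
          intro e he
          rcases List.mem_append.mp he with h1 | h2
          · exact hP e h1
          · unfold pvFirstList at h2
            by_cases hf : pvFirst l != ""
            · simp only [hf, if_true, List.mem_singleton] at h2
              simpa [h2] using pvNS_first_pos l (by simpa using hf)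
            · simp [hf] at h2
        refine ih res l [] (descA ++ pvFirstList l) hnl (by simp [hne]) hPl ?_
        have := pvBR_name_empty_named l hnl
        simpa [List.any_cons, this] using hany
      · -- the first named header after the leak: the descriptions differ in non-space weight
        rw [pvLA t res (pvName l) (descA ++ pvFirstList l) hnl,
          pvLB t res l [] hnl]
        simp only [List.append_assoc, List.singleton_append]
        apply pvOut_ne
        intro heq
        have hdesc := (by simpa using heq : PySem.Str.strip (PySem.Str.join "\n"
            ((descA ++ pvFirstList l) ++ (t.takeWhile (fun u => !pvIsHeader u)).map PySem.Str.strip))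
          = PySem.Str.strip (PySem.Str.join "\n"
            (pvFirstList l ++ (([] ++ t.takeWhile (fun u => !pvIsHeader u)).map PySem.Str.strip))))
        have hNS := congrArg pvNS hdesc
        rw [pvNS_strip, pvNS_strip, pvNS_join, pvNS_join] at hNS
        obtain ⟨e0, descA', rfl⟩ := List.exists_cons_of_ne_nil hne
        have h1 := hP e0 (by simp)
        simp only [List.nil_append, List.map_append, List.sum_append, List.map_cons,
          List.sum_cons, List.append_assoc] at hNS
        omega
    · have hstep : pvAStep (res, some (pvName h), descA) l
          = (res, some (pvName h), descA) := by
        unfold pvAStep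
        rw [if_neg (by simpa [pvIsHeader] using hH)]
        simp [htr]
      have hbs : pvBStep [(h, b)] l = [(h, b ++ [l])] := by
        unfold pvBStep; rw [if_neg hH]; simp
      rw [hstep, hbs]
      refine ih res h (b ++ [l]) descA hn hne hP ?_
      have := pvBR_not_header_named l hH
      simpa [List.any_cons, this] using hany

-- walking to the first leak (pvPat still true ahead, A and B in matching states)
lemma pvS : ∀ (t : List String) (res : List (List (String × String))) (h : String)
    (b descA : List String), pvPat t = true →
    (pvName h = "" → descA = []) →
    (pvName h ≠ "" → descA = pvFirstList h ++ b.map PySem.Str.strip) →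
    pvAFinal (List.foldl pvAStep (res, some (pvName h), descA) t)
      ≠ List.foldl pvEmit res (List.foldl pvBStep [(h, b)] t) := by
  intro t
  induction t with
  | nil => intro _ _ _ _ hpat _ _; simp [pvPat] at hpat
  | cons l t ih =>
    intro res h b descA hpat hemp hne
    rw [pvPat_cons] at hpat
    simp only [List.foldl_cons]
    by_cases hH : pvIsHeader l = true
    · have hbs : pvBStep [(h, b)] l = [(h, b)] ++ [(l, [])] := by
        unfold pvBStep; rw [if_pos hH]
      rw [hbs, pvB_prefix t [(h, b)] [(l, [])] (by simp), List.singleton_append,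
        List.foldl_cons]
      -- A's step and B's emit of the closing block agree
      by_cases hn : pvName h = ""
      · have htr : pyTruthy (some (pvName h)) = false := by simp [pyTruthy, hn]
        have hstep : pvAStep (res, some (pvName h), descA) l
            = (res, some (pvName l), descA ++ pvFirstList l) := by
          unfold pvAStep
          rw [if_pos (by simpa [pvIsHeader] using hH)]
          simp only [htr, Bool.false_eq_true, if_false]
          simp only [pvName, pvFirst, pvFirstList]
          split <;> simp
        have hEmit : pvEmit res (h, b) = res := by simp [pvEmit, hn]
        rw [hstep, hEmit, hemp hn, List.nil_append]
        by_cases hnl : pvName l = ""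
        · by_cases hf : pvFirst l = ""
          · have hleak : pvLeak l = false := pvBR_first_empty_leak l hf
            have hpat' : pvPat t = true := by simpa [hleak] using hpat
            exact ih res l [] (pvFirstList l) hpat' (fun _ => by simp [pvFirstList, hf])
              (fun hc => absurd hnl hc)
          · have hfl : pvFirstList l = [pvFirst l] := by
              unfold pvFirstList
              rw [if_pos (by simpa using hf)]
            by_cases hany : t.any pvNamed = true
            · exact pvDIFF1 t res l [] (pvFirstList l) hnl
                (by rw [hfl]; simp)
                (by
                  intro e he
                  rw [hfl, List.mem_singleton] at he
                  simpa [he] using pvNS_first_pos l hf) hany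
            · have hpat' : pvPat t = true := by
                rcases Bool.or_eq_true_iff.mp hpat with h1 | h2
                · simp only [Bool.and_eq_true] at h1
                  exact absurd h1.2 (by simpa using hany)
                · exact h2
              exact absurd (pvPat_any_named t hpat') (by simpa using hany)
        · have hleak : pvLeak l = false := pvBR_name_ne_leak l hnl
          have hpat' : pvPat t = true := by simpa [hleak] using hpat
          exact ih res l [] (pvFirstList l) hpat' (fun hc => absurd hc hnl)
            (fun _ => by simp)
      · have htr : pyTruthy (some (pvName h)) = true := by simpa [pyTruthy] using hn
        have hstep : pvAStep (res, some (pvName h), descA) l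
            = (res ++ [[("name", pvName h),
                ("description", PySem.Str.strip (PySem.Str.join "\n" descA))]],
               some (pvName l), [] ++ pvFirstList l) := by
          unfold pvAStep
          rw [if_pos (by simpa [pvIsHeader] using hH)]
          simp only [htr, if_true, Option.getD_some]
          simp only [pvName, pvFirst, pvFirstList]
          split <;> simp
        have hEmit : pvEmit res (h, b)
            = res ++ [[("name", pvName h),
                ("description", PySem.Str.strip (PySem.Str.join "\n" descA))]] := by
          simp [pvEmit, hn, hne hn]
        rw [hstep, hEmit, List.nil_append]
        by_cases hnl : pvName l = ""
        · by_cases hf : pvFirst l = ""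
          · have hleak : pvLeak l = false := pvBR_first_empty_leak l hf
            have hpat' : pvPat t = true := by simpa [hleak] using hpat
            exact ih _ l [] (pvFirstList l) hpat' (fun _ => by simp [pvFirstList, hf])
              (fun hc => absurd hnl hc)
          · have hfl : pvFirstList l = [pvFirst l] := by
              unfold pvFirstList
              rw [if_pos (by simpa using hf)]
            by_cases hany : t.any pvNamed = true
            · exact pvDIFF1 t _ l [] (pvFirstList l) hnl
                (by rw [hfl]; simp)
                (by
                  intro e he
                  rw [hfl, List.mem_singleton] at he
                  simpa [he] using pvNS_first_pos l hf) hany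
            · have hpat' : pvPat t = true := by
                rcases Bool.or_eq_true_iff.mp hpat with h1 | h2
                · simp only [Bool.and_eq_true] at h1
                  exact absurd h1.2 (by simpa using hany)
                · exact h2
              exact absurd (pvPat_any_named t hpat') (by simpa using hany)
        · have hleak : pvLeak l = false := pvBR_name_ne_leak l hnl
          have hpat' : pvPat t = true := by simpa [hleak] using hpat
          exact ih _ l [] (pvFirstList l) hpat' (fun hc => absurd hc hnl)
            (fun _ => by simp)
    · have hleak : pvLeak l = false := pvBR_not_header_leak l hH
      have hpat' : pvPat t = true := by simpa [hleak] using hpat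
      have hbs : pvBStep [(h, b)] l = [(h, b ++ [l])] := by
        unfold pvBStep; rw [if_neg hH]; simp
      rw [hbs]
      by_cases hn : pvName h = ""
      · have htr : pyTruthy (some (pvName h)) = false := by simp [pyTruthy, hn]
        have hstep : pvAStep (res, some (pvName h), descA) l
            = (res, some (pvName h), descA) := by
          unfold pvAStep
          rw [if_neg (by simpa [pvIsHeader] using hH)]
          simp [htr]
        rw [hstep]
        exact ih res h (b ++ [l]) descA hpat' hemp (fun hc => absurd hn hc)
      · have htr : pyTruthy (some (pvName h)) = true := by simpa [pyTruthy] using hn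
        have hstep : pvAStep (res, some (pvName h), descA) l
            = (res, some (pvName h), descA ++ [PySem.Str.strip l]) := by
          unfold pvAStep
          rw [if_neg (by simpa [pvIsHeader] using hH)]
          simp [htr]
        rw [hstep]
        exact ih res h (b ++ [l]) (descA ++ [PySem.Str.strip l]) hpat'
          (fun hc => absurd hc hn) (fun _ => by rw [hne hn]; simp)

lemma pvT : ∀ raw : List String, pvPat raw = true →
    pvAFinal (List.foldl pvAStep ([], none, []) raw)
      ≠ (List.foldl pvBStep [] raw).foldl pvEmit [] := by
  intro raw
  induction raw with
  | nil => intro hpat; simp [pvPat] at hpat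
  | cons l t ih =>
    intro hpat
    rw [pvPat_cons] at hpat
    simp only [List.foldl_cons]
    by_cases hH : pvIsHeader l = true
    · have hstep : pvAStep ([], none, []) l
          = ([], some (pvName l), [] ++ pvFirstList l) := by
        unfold pvAStep
        rw [if_pos (by simpa [pvIsHeader] using hH)]
        simp only [pyTruthy, Bool.false_eq_true, if_false]
        simp only [pvName, pvFirst, pvFirstList]
        split <;> simp
      have hbs : pvBStep [] l = [(l, [])] := by unfold pvBStep; rw [if_pos hH]; rfl
      rw [hstep, hbs, List.nil_append]
      by_cases hnl : pvName l = ""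
      · by_cases hf : pvFirst l = ""
        · have hleak : pvLeak l = false := pvBR_first_empty_leak l hf
          have hpat' : pvPat t = true := by simpa [hleak] using hpat
          exact pvS t [] l [] (pvFirstList l) hpat' (fun _ => by simp [pvFirstList, hf])
            (fun hc => absurd hnl hc)
        · have hfl : pvFirstList l = [pvFirst l] := by
            unfold pvFirstList
            rw [if_pos (by simpa using hf)]
          by_cases hany : t.any pvNamed = true
          · exact pvDIFF1 t [] l [] (pvFirstList l) hnl
              (by rw [hfl]; simp)
              (by
                intro e he
                rw [hfl, List.mem_singleton] at he
                simpa [he] using pvNS_first_pos l hf) hany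
          · have hpat' : pvPat t = true := by
              rcases Bool.or_eq_true_iff.mp hpat with h1 | h2
              · simp only [Bool.and_eq_true] at h1
                exact absurd h1.2 (by simpa using hany)
              · exact h2
            exact absurd (pvPat_any_named t hpat') (by simpa using hany)
      · have hleak : pvLeak l = false := pvBR_name_ne_leak l hnl
        have hpat' : pvPat t = true := by simpa [hleak] using hpat
        exact pvS t [] l [] (pvFirstList l) hpat' (fun hc => absurd hc hnl)
          (fun _ => by simp)
    · have hleak : pvLeak l = false := pvBR_not_header_leak l hH
      have hpat' : pvPat t = true := by simpa [hleak] using hpat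
      have hstep : pvAStep ([], none, []) l = ([], none, []) := by
        unfold pvAStep
        rw [if_neg (by simpa [pvIsHeader] using hH)]
        simp [pyTruthy]
      have hbs : pvBStep [] l = [] := by unfold pvBStep; rw [if_neg hH]; rfl
      rw [hstep, hbs]
      exact ih hpat'

-- ===== VERDICT (by name: the statements are the Claim_ definitions above) =====
theorem parse_raw_parameters_spec : Claim_unchanged_parse_raw_parameters := by
  intro raw _ hD
  have hpat : pvPat raw = false := by
    cases hx : pvPat raw
    · rfl
    · exact absurd hx hD
  show parse_raw_parameters raw = parse_raw_parameters_alt raw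
  unfold parse_raw_parameters parse_raw_parameters_alt pvBlocks
  exact pvMain_none raw hpat

theorem parse_raw_parameters_changed : Claim_changed_parse_raw_parameters := by
  unfold Claim_changed_parse_raw_parameters; decide

theorem parse_raw_parameters_tight : Claim_exact_parse_raw_parameters := by
  intro raw _ hD
  show parse_raw_parameters raw ≠ parse_raw_parameters_alt raw
  unfold parse_raw_parameters parse_raw_parameters_alt pvBlocks
  exact pvT raw hD
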